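-- pv_equiv track=rewrite | github.com/dicleozturk/classical_nlp_pipeline | pipeline_legacy/dataset/NER_conversions/plain_to_conll.py | tokenize_for_conll
-- ===== SOURCE A (Python) =====
-- entsep = "_"
--
-- tokensep = "##"
--
-- labels = ["LOC", "PER", "ORG"]
--
-- def tokenize_for_conll(text, docid, pos2=-1):
--
--     tokens = text.split()
--     tokens = [t.strip() for t in tokens]
--
--     conll_tokens = []
--
--     pos1 = 0
--     #pos2 = -1
--     for token in tokens:
--
--         is_entity = False
--         for label in labels:
--             if token.startswith(label+entsep):
--                 is_entity = True
--                 break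
--
--         if is_entity:
--             pieces1 = token.split(entsep)
--             entity_label = pieces1[0]
--             entity_tokens = pieces1[1].split(tokensep)
--
--             for i,et in enumerate(entity_tokens):
--                 if i == 0:
--                     token_label = "B-" + entity_label
--                 else:
--                     token_label = "I-" + entity_label
--
--                 pos1 = pos2 + 1
--                 pos2 = pos1 + len(et)
--
--                 conll_tokens.append((et, docid, pos1, pos2, token_label))
--
--         else:
--             pos1 = pos2 + 1
--             pos2 = pos1 + len(token)
--             token_label = "O"
--             conll_tokens.append((token, docid, pos1, pos2, token_label))
--
--     return conll_tokens
-- ===== SOURCE B (Python) =====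
-- entsep = "_"
--
-- tokensep = "##"
--
-- labels = ["LOC", "PER", "ORG"]
--
-- def tokenize_for_conll(text, docid, pos2=-1):
--     # Pass 1: expand every token into (piece, label) pairs.
--     pieces = []
--     for token in (t.strip() for t in text.split()):
--         if any(token.startswith(label + entsep) for label in labels):
--             parts = token.split(entsep)
--             label, subs = parts[0], parts[1].split(tokensep)
--             pieces.append((subs[0], "B-" + label))
--             pieces += [(s, "I-" + label) for s in subs[1:]]
--         else:
--             pieces.append((token, "O"))
--     # Pass 2: assign running character offsets.
--     out = []
--     for piece, label in pieces:
--         pos1 = pos2 + 1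
--         pos2 = pos1 + len(piece)
--         out.append((piece, docid, pos1, pos2, label))
--     return out
-- ===== Notes on version B (the rewrite author's own statement) =====
-- stated objective: alternative
-- what changed: Splits the single interleaved loop into two passes: one that expands tokens into flat (piece, label) pairs (entity expansion, B-/I- tagging) and one that walks that flat list assigning running offsets, separating entity logic from position bookkeeping.
import Mathlib
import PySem

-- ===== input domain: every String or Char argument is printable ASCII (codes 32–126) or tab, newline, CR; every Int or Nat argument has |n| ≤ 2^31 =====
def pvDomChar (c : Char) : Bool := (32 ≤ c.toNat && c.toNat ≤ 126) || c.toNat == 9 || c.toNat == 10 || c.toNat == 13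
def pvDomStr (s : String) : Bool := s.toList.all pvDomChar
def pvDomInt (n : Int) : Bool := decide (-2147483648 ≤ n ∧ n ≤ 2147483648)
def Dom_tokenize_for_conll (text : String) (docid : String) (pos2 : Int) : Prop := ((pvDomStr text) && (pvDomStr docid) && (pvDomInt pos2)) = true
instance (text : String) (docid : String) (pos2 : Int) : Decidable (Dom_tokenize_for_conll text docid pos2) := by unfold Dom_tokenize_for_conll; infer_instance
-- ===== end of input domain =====

-- B separates A's single interleaved loop into two passes (entity expansion, then offset bookkeeping); same cost, different decomposition.

-- ===== PORT A =====
-- one token's action on the state (accumulated conll_tokens, pos2); the inner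
-- enumerate(entity_tokens) loop is a fold that carries the index i in the state.
-- split? _ "_" / split? _ "##" is always `some` (the separator is nonempty), so `.getD []`
-- is exact; `pieces1.getD 1 ""` is exact because is_entity guarantees index 1 exists.
def pvStepA (docid : String) (st : List (String × String × Int × Int × String) × Int)
    (token : String) : List (String × String × Int × Int × String) × Int :=
  let is_entity := ["LOC", "PER", "ORG"].any (fun label => PySem.Str.startswith token (label ++ "_"))
  if is_entity then
    let pieces1 := (PySem.Str.split? token "_").getD []
    let entity_label := pieces1.getD 0 ""
    let entity_tokens := (PySem.Str.split? (pieces1.getD 1 "") "##").getD []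
    (entity_tokens.foldl
      (fun (st2 : (List (String × String × Int × Int × String) × Int) × Nat) et =>
        let token_label := if st2.2 = 0 then "B-" ++ entity_label else "I-" ++ entity_label
        let pos1 := st2.1.2 + 1
        let p2 := pos1 + PySem.Str.len et
        ((st2.1.1 ++ [(et, docid, pos1, p2, token_label)], p2), st2.2 + 1))
      (st, 0)).1
  else
    let pos1 := st.2 + 1
    let p2 := pos1 + PySem.Str.len token
    (st.1 ++ [(token, docid, pos1, p2, "O")], p2)

def tokenize_for_conll (text : String) (docid : String) (pos2 : Int) : List (String × String × Int × Int × String) :=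
  let tokens := (PySem.Str.split₀ text).map PySem.Str.strip
  (tokens.foldl (pvStepA docid) ([], pos2)).1

-- ===== PORT B =====
-- pass 1: expand one token into its flat (piece, label) pairs.
-- subs (a result of str.split) is never empty, so the [] branch (where the Python
-- subs[0] would raise) is unreachable.
def pvExpand (token : String) : List (String × String) :=
  if ["LOC", "PER", "ORG"].any (fun label => PySem.Str.startswith token (label ++ "_")) then
    let parts := (PySem.Str.split? token "_").getD []
    let label := parts.getD 0 ""
    let subs := (PySem.Str.split? (parts.getD 1 "") "##").getD []
    match subs with
    | [] => []
    | s0 :: rest => (s0, "B-" ++ label) :: rest.map (fun s => (s, "I-" ++ label))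
  else [(token, "O")]

-- pass 2: one (piece, label) pair's action on (out, pos2)
def pvStepB (docid : String) (st : List (String × String × Int × Int × String) × Int)
    (pl : String × String) : List (String × String × Int × Int × String) × Int :=
  let pos1 := st.2 + 1
  let p2 := pos1 + PySem.Str.len pl.1
  (st.1 ++ [(pl.1, docid, pos1, p2, pl.2)], p2)

def tokenize_for_conll_alt (text : String) (docid : String) (pos2 : Int) : List (String × String × Int × Int × String) :=
  let tokens := (PySem.Str.split₀ text).map PySem.Str.strip
  let pieces := tokens.foldl (fun acc t => acc ++ pvExpand t) []
  (pieces.foldl (pvStepB docid) ([], pos2)).1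

-- ===== PRECONDITION & SPEC =====
def Spec_tokenize_for_conll (text : String) (docid : String) (pos2 : Int) (out : List (String × String × Int × Int × String)) : Prop := out = tokenize_for_conll_alt text docid pos2
instance (text : String) (docid : String) (pos2 : Int) (out : List (String × String × Int × Int × String)) : Decidable (Spec_tokenize_for_conll text docid pos2 out) := by unfold Spec_tokenize_for_conll; infer_instance

-- ===== CLAIM (what is proved, stated in full; the proofs are below) =====
def Claim_equal_tokenize_for_conll : Prop := ∀ (text : String) (docid : String) (pos2 : Int), Dom_tokenize_for_conll text docid pos2 → Spec_tokenize_for_conll text docid pos2 (tokenize_for_conll text docid pos2)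

-- ===== LEMMAS AND PROOFS =====

-- A's inner loop from index n+1 on only produces "I-" labels, i.e. it is exactly
-- B's offset pass over the "I-"-tagged tail.
theorem pv_inner_tail (docid lab : String) (ts : List String) :
    ∀ (st : List (String × String × Int × Int × String) × Int) (n : Nat),
    (ts.foldl
      (fun (st2 : (List (String × String × Int × Int × String) × Int) × Nat) et =>
        let token_label := if st2.2 = 0 then "B-" ++ lab else "I-" ++ lab
        let pos1 := st2.1.2 + 1
        let p2 := pos1 + PySem.Str.len et
        ((st2.1.1 ++ [(et, docid, pos1, p2, token_label)], p2), st2.2 + 1))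
      (st, n + 1)).1
      = (ts.map (fun s => (s, "I-" ++ lab))).foldl (pvStepB docid) st := by
  induction ts with
  | nil => intro st n; rfl
  | cons h t ih =>
      intro st n
      simp only [List.foldl_cons, List.map_cons]
      have : n + 1 ≠ 0 := Nat.succ_ne_zero n
      simp only [this]
      exact ih _ (n + 1)

-- one token of A's loop = B's offset pass over that token's expansion
theorem pv_perToken (docid : String) (st : List (String × String × Int × Int × String) × Int)
    (token : String) :
    pvStepA docid st token = (pvExpand token).foldl (pvStepB docid) st := by
  unfold pvStepA pvExpand
  by_cases h : (["LOC", "PER", "ORG"].any fun label => PySem.Str.startswith token (label ++ "_")) = true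
  · simp only [h, if_pos]
    cases hsubs : (PySem.Str.split? (((PySem.Str.split? token "_").getD []).getD 1 "") "##").getD [] with
    | nil => rfl
    | cons s0 rest =>
        simp only [List.foldl_cons]
        exact pv_inner_tail docid _ rest _ 0
  · simp only [h, if_neg, Bool.false_eq_true, not_false_eq_true, List.foldl_cons, List.foldl_nil]
    rfl

-- whole loop: A's fold over tokens = B's offset pass over the concatenated expansions
theorem pv_loop (docid : String) (tokens : List String) :
    ∀ (st : List (String × String × Int × Int × String) × Int),
    tokens.foldl (pvStepA docid) st = (tokens.flatMap pvExpand).foldl (pvStepB docid) st := by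
  induction tokens with
  | nil => intro st; rfl
  | cons h t ih =>
      intro st
      simp only [List.foldl_cons, List.flatMap_cons, List.foldl_append]
      rw [pv_perToken, ih]

-- ===== VERDICT (by name: the statement is the Claim_ definition above) =====
theorem tokenize_for_conll_spec : Claim_equal_tokenize_for_conll := by
  intro text docid pos2 _
  unfold Spec_tokenize_for_conll tokenize_for_conll tokenize_for_conll_alt
  simp only []
  rw [PySem.List.foldl_append_eq_flatMap, List.nil_append, pv_loop]
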